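-- pv_equiv track=rewrite | github.com/Cristian0Caceres/INFO1126-1 | proyecto2/dashboard original.py | generar_nombres_nodos
-- ===== SOURCE A (Python) =====
-- import itertools
-- import string
--
-- def generar_nombres_nodos(n):
--     letras = string.ascii_uppercase
--     nombres = []
--     for size in range(1, 4):
--         for comb in itertools.product(letras, repeat=size):
--             nombres.append(''.join(comb))
--             if len(nombres) == n:
--                 return nombres
--     return nombres[:n]
-- ===== SOURCE B (Python) =====
-- def generar_nombres_nodos(n):
--     nombres = []
--     for i in range(1, 18279):  # 26 + 26**2 + 26**3 names
--         name = ""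
--         while i > 0:
--             i, r = divmod(i - 1, 26)
--             name = chr(65 + r) + name
--         nombres.append(name)
--         if len(nombres) == n:
--             return nombres
--     return nombres[:n]
-- ===== Notes on version B (the rewrite author's own statement) =====
-- stated objective: alternative
-- what changed: Replaced the nested itertools.product traversal (tuples of letters per size 1..3) by one flat counter loop over 1..18278 that converts each counter to its name by bijective base-26 divmod arithmetic.
import Mathlib
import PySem

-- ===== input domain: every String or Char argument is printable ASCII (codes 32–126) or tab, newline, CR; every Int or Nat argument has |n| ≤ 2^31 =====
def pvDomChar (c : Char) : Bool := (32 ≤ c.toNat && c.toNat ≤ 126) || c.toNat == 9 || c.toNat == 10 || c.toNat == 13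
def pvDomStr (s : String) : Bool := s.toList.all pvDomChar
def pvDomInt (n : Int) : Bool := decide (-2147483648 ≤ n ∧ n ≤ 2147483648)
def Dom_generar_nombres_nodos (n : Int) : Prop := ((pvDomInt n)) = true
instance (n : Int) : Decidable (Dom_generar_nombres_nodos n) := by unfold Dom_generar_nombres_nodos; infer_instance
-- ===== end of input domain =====

-- B replaces the nested itertools.product generation by one flat counter loop with
-- bijective base-26 conversion of each counter value (objective: idiomatic/alternative).

-- ===== PORT A =====
-- string.ascii_uppercase
def letras : List Char := ['A', 'B', 'C', 'D', 'E', 'F', 'G', 'H', 'I', 'J', 'K', 'L', 'M',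
  'N', 'O', 'P', 'Q', 'R', 'S', 'T', 'U', 'V', 'W', 'X', 'Y', 'Z']

-- itertools.product(letras, repeat=size): lexicographic tuples, first coordinate slowest
def prodA : Nat → List (List Char)
  | 0 => [[]]
  | k+1 => letras.flatMap (fun c => (prodA k).map (fun t => c :: t))

-- the doubly-nested for with early return, run over the flattened sequence of names
def aLoop (n : Int) (nombres : List String) : List String → List String
  | [] => PySem.List.slice nombres none (some n)          -- return nombres[:n]
  | s :: rest =>
    let nombres' := nombres ++ [s]
    if (nombres'.length : Int) = n then nombres' else aLoop n nombres' rest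

def generar_nombres_nodos (n : Int) : List String :=
  aLoop n [] ((PySem.List.pyRange 1 4 1).flatMap
    (fun size => (prodA size.toNat).map String.ofList))

-- ===== PORT B =====
-- the `while i > 0: i, r = divmod(i - 1, 26); name = chr(65 + r) + name` loop;
-- fuel (first argument, called with fuel = i) only makes the recursion structural:
-- i strictly decreases each iteration, so i iterations always suffice — exact.
def bWhile : Nat → Nat → List Char → List Char
  | 0, _, name => name
  | fuel+1, i, name =>
    if i > 0 then bWhile fuel ((i-1)/26) (Char.ofNat (65 + (i-1) % 26) :: name) else name

-- the `for i in range(1, 18279)` loop with early return; i is ≥ 1 here, so i.toNat = i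
def bLoop (n : Int) (nombres : List String) : List Int → List String
  | [] => PySem.List.slice nombres none (some n)          -- return nombres[:n]
  | i :: rest =>
    let nombres' := nombres ++ [String.ofList (bWhile i.toNat i.toNat [])]
    if (nombres'.length : Int) = n then nombres' else bLoop n nombres' rest

def generar_nombres_nodos_alt (n : Int) : List String :=
  bLoop n [] (PySem.List.pyRange 1 18279 1)

-- ===== PRECONDITION & SPEC =====
def Spec_generar_nombres_nodos (n : Int) (out : List String) : Prop := out = generar_nombres_nodos_alt n
instance (n : Int) (out : List String) : Decidable (Spec_generar_nombres_nodos n out) := by unfold Spec_generar_nombres_nodos; infer_instance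

-- ===== CLAIM (what is proved, stated in full; the proofs are below) =====
def Claim_equal_generar_nombres_nodos : Prop := ∀ (n : Int), Dom_generar_nombres_nodos n → Spec_generar_nombres_nodos n (generar_nombres_nodos n)

-- ===== LEMMAS AND PROOFS =====

-- first counter value whose name has length k (1, 27, 703, …): baseP k = 1+26+…+26^(k-1)
def baseP : Nat → Nat
  | 0 => 0
  | k+1 => 1 + 26 * baseP k

-- the k-digit base-26 representation of i (low digit last)
def padRep : Nat → Nat → List Char
  | 0, _ => []
  | k+1, i => padRep k (i / 26) ++ [Char.ofNat (65 + i % 26)]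

theorem bWhile_zero (fuel : Nat) (name : List Char) : bWhile fuel 0 name = name := by
  cases fuel <;> simp [bWhile]

theorem baseP_succ (k : Nat) : baseP k + 26 ^ k = baseP (k+1) := by
  induction k with
  | zero => rfl
  | succ k ih => simp only [baseP, pow_succ] at *; omega

theorem le_baseP (k : Nat) : k ≤ baseP k := by
  induction k with
  | zero => simp [baseP]
  | succ k ih => simp only [baseP]; omega

theorem bWhile_eq_padRep : ∀ (k fuel i : Nat) (name : List Char), k ≤ fuel → i < 26 ^ k →
    bWhile fuel (baseP k + i) name = padRep k i ++ name := by
  intro k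
  induction k with
  | zero =>
    intro fuel i name _ hi
    have hi0 : i = 0 := by omega
    subst hi0
    show bWhile fuel (baseP 0 + 0) name = padRep 0 0 ++ name
    simp only [baseP, padRep, Nat.add_zero, List.nil_append]
    exact bWhile_zero fuel name
  | succ k ih =>
    intro fuel i name hf hi
    obtain ⟨f, rfl⟩ : ∃ f, fuel = f + 1 := ⟨fuel - 1, by omega⟩
    have hpos : baseP (k+1) + i > 0 := by simp [baseP]
    have harg : baseP (k+1) + i - 1 = i + baseP k * 26 := by simp only [baseP]; ring_nf; omega
    have hdiv : (baseP (k+1) + i - 1) / 26 = baseP k + i / 26 := by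
      rw [harg, Nat.add_mul_div_right _ _ (by norm_num)]; omega
    have hmod : (baseP (k+1) + i - 1) % 26 = i % 26 := by
      rw [harg, Nat.add_mul_mod_self_right]
    have hlt : i / 26 < 26 ^ k := by
      rw [Nat.div_lt_iff_lt_mul (by norm_num)]
      calc i < 26 ^ (k+1) := hi
        _ = 26 ^ k * 26 := pow_succ 26 k
    simp only [bWhile, if_pos hpos, hdiv, hmod]
    rw [ih f (i / 26) _ (by omega) hlt]
    simp [padRep]

theorem padRep_cons : ∀ (k i : Nat), i < 26 ^ (k+1) →
    padRep (k+1) i = Char.ofNat (65 + i / 26 ^ k) :: padRep k (i % 26 ^ k) := by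
  intro k
  induction k with
  | zero =>
    intro i hi
    rw [pow_one] at hi
    simp [padRep, Nat.mod_eq_of_lt hi]
  | succ k ih =>
    intro i hi
    obtain ⟨q, r, hqr, hrlt⟩ : ∃ q r, i = q * 26 ^ (k+1) + r ∧ r < 26 ^ (k+1) :=
      ⟨i / 26 ^ (k+1), i % 26 ^ (k+1), by rw [mul_comm]; exact (Nat.div_add_mod i _).symm,
        Nat.mod_lt _ (by positivity)⟩
    have hshape : i = r + q * 26 ^ k * 26 := by rw [hqr, pow_succ]; ring
    have hdiv26 : i / 26 = r / 26 + q * 26 ^ k := by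
      rw [hshape, Nat.add_mul_div_right _ _ (by norm_num)]
    have hr26 : r / 26 < 26 ^ k := by
      rw [Nat.div_lt_iff_lt_mul (by norm_num), ← pow_succ]; exact hrlt
    have h1 : i / 26 < 26 ^ (k+1) := by
      rw [hdiv26, pow_succ]
      have hq26 : q < 26 := by
        rcases Nat.lt_or_ge q 26 with h | h
        · exact h
        · exfalso
          have hm : 26 * 26 ^ (k+1) ≤ q * 26 ^ (k+1) := Nat.mul_le_mul_right _ h
          have h26 : 26 ^ (k+1+1) = 26 * 26 ^ (k+1) := by rw [pow_succ]; ring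
          omega
      calc r / 26 + q * 26 ^ k < 26 ^ k + q * 26 ^ k := by omega
        _ = (1 + q) * 26 ^ k := by ring
        _ ≤ 26 * 26 ^ k := Nat.mul_le_mul_right _ (by omega)
        _ = 26 ^ k * 26 := by ring
    have hdivhi : i / 26 / 26 ^ k = q := by
      rw [hdiv26, Nat.add_mul_div_right _ _ (by positivity), Nat.div_eq_of_lt hr26]
      omega
    have hmodlo : i / 26 % 26 ^ k = r / 26 := by
      rw [hdiv26, Nat.add_mul_mod_self_right, Nat.mod_eq_of_lt hr26]
    have hitop : i / 26 ^ (k+1) = q := by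
      rw [hqr, mul_comm q, Nat.mul_add_div (by positivity), Nat.div_eq_of_lt hrlt]
      omega
    have himod : i % 26 ^ (k+1) = r := by
      rw [hqr, mul_comm q, Nat.mul_add_mod, Nat.mod_eq_of_lt hrlt]
    have himod26 : i % 26 = r % 26 := by
      rw [hshape, Nat.add_mul_mod_self_right]
    show padRep (k+1) (i / 26) ++ [Char.ofNat (65 + i % 26)] = _
    rw [ih _ h1, hdivhi, hmodlo, hitop, himod, himod26]
    rfl

theorem range_mul_flatMap {α : Type} (a b : Nat) (f : Nat → α) :
    (List.range (a * b)).map f =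
      (List.range a).flatMap (fun q => (List.range b).map (fun r => f (q * b + r))) := by
  induction a with
  | zero => simp
  | succ a ih =>
    rw [Nat.succ_mul, List.range_add, List.range_succ]
    simp only [List.map_append, List.flatMap_append, ih, List.flatMap_singleton, List.map_map]
    rfl

theorem letras_eq : letras = (List.range 26).map (fun d => Char.ofNat (65 + d)) := by decide

theorem prodA_eq : ∀ k, prodA k = (List.range (26 ^ k)).map (padRep k) := by
  intro k
  induction k with
  | zero => simp [prodA, padRep]
  | succ k ih =>
    have hm : 26 ^ (k+1) = 26 * 26 ^ k := by rw [pow_succ']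
    rw [hm, range_mul_flatMap 26 (26 ^ k) (padRep (k+1))]
    simp only [prodA, letras_eq, ih, List.flatMap_map, List.map_map]
    rw [List.flatMap_def, List.flatMap_def]
    apply congrArg List.flatten
    apply List.map_congr_left
    intro q hq
    apply List.map_congr_left
    intro r hr
    rw [List.mem_range] at hq hr
    have hlt : q * 26 ^ k + r < 26 ^ (k+1) := by
      rw [pow_succ]
      calc q * 26 ^ k + r < q * 26 ^ k + 26 ^ k := by omega
        _ = (q + 1) * 26 ^ k := by ring
        _ ≤ 26 * 26 ^ k := by
          have : q + 1 ≤ 26 := by omega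
          exact Nat.mul_le_mul_right _ this
        _ = 26 ^ k * 26 := by ring
    rw [padRep_cons k _ hlt, mul_comm q (26 ^ k), Nat.mul_add_div (by positivity),
      Nat.mul_add_mod, Nat.div_eq_of_lt hr, Nat.mod_eq_of_lt hr, Nat.add_zero]
    rfl

theorem names_eq :
    (PySem.List.pyRange 1 18279 1).map (fun i => String.ofList (bWhile i.toNat i.toNat [])) =
      (PySem.List.pyRange 1 4 1).flatMap (fun size => (prodA size.toNat).map String.ofList) := by
  have seg : ∀ k : Nat,
      (PySem.List.pyRange ((baseP k : Nat) : Int) ((baseP (k+1) : Nat) : Int) 1).map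
          (fun i => String.ofList (bWhile i.toNat i.toNat [])) =
        (prodA k).map String.ofList := by
    intro k
    rw [PySem.List.pyRange_one]
    have hlen : (((baseP (k+1) : Nat) : Int) - ((baseP k : Nat) : Int)).toNat = 26 ^ k := by
      have h := baseP_succ k
      generalize 26 ^ k = e at h ⊢
      omega
    rw [hlen, List.map_map, prodA_eq, List.map_map]
    apply List.map_congr_left
    intro j hj
    rw [List.mem_range] at hj
    have htn : (((baseP k : Nat) : Int) + (j : Int)).toNat = baseP k + j := by omega
    simp only [Function.comp_apply, htn]
    rw [bWhile_eq_padRep k (baseP k + j) j [] (by have := le_baseP k; omega) hj,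
      List.append_nil]
  have h13 : PySem.List.pyRange 1 18279 1 =
      PySem.List.pyRange 1 27 1 ++ PySem.List.pyRange 27 703 1 ++ PySem.List.pyRange 703 18279 1 := by
    rw [← PySem.List.pyRange_one_append 1 27 703 (by norm_num) (by norm_num),
      ← PySem.List.pyRange_one_append 1 703 18279 (by norm_num) (by norm_num)]
  have h4 : PySem.List.pyRange 1 4 1 = [1, 2, 3] := by decide
  rw [h13, h4, List.map_append, List.map_append]
  have s1 := seg 1
  have s2 := seg 2
  have s3 := seg 3
  norm_num [baseP] at s1 s2 s3
  rw [s1, s2, s3]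
  simp [List.flatMap_cons]

theorem loop_eq : ∀ (is : List Int) (n : Int) (acc : List String),
    bLoop n acc is = aLoop n acc (is.map (fun i => String.ofList (bWhile i.toNat i.toNat []))) := by
  intro is
  induction is with
  | nil => intro n acc; rfl
  | cons i rest ih =>
    intro n acc
    simp only [bLoop, aLoop, List.map_cons]
    split_ifs <;> simp [ih]

-- ===== VERDICT (by name: the statement is the Claim_ definition above) =====
theorem generar_nombres_nodos_spec : Claim_equal_generar_nombres_nodos := by
  intro n _
  unfold Spec_generar_nombres_nodos generar_nombres_nodos generar_nombres_nodos_alt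
  rw [loop_eq, names_eq]
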